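-- pv_equiv track=rewrite | github.com/fdslight/ixcsys | pywind/lib/template2/syntax_parser.py | __split_string_from_pos_info
-- ===== SOURCE A (Python) =====
-- TEXT_TYPE_TEXT = 0
--
-- TEXT_TYPE_CRLF = 1
--
-- TEXT_TYPE_VAR_LEFT = 2
--
-- TEXT_TYPE_VAR_BLOCK = 3
--
-- TEXT_TYPE_VAR_RIGHT = 4
--
-- TEXT_TYPE_LOGIC_LEFT = 5
--
-- TEXT_TYPE_LOGIC_BLOCK = 6
--
-- TEXT_TYPE_LOGIC_RIGHT = 7
--
-- def __split_string_from_pos_info(s: str, pos_results: list):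
--     """通过提供的关键字信息分割字符串
--     """
--     results = []
--     pos = 0
--     last_text_type = TEXT_TYPE_TEXT
--     for line_no, text_type, start_pos in pos_results:
--         b = pos
--         if text_type == TEXT_TYPE_CRLF:
--             pos = start_pos + 1
--             e = pos
--         else:
--             pos = start_pos + 2
--             e = start_pos
--
--         if last_text_type == TEXT_TYPE_VAR_LEFT and text_type == TEXT_TYPE_VAR_RIGHT:
--             _type = TEXT_TYPE_VAR_BLOCK
--         elif last_text_type == TEXT_TYPE_LOGIC_LEFT and text_type == TEXT_TYPE_LOGIC_RIGHT:
--             _type = TEXT_TYPE_LOGIC_BLOCK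
--         else:
--             _type = TEXT_TYPE_TEXT
--
--         last_text_type = text_type
--         results.append((line_no, _type, s[b:e]))
--
--     return results
-- ===== SOURCE B (Python) =====
-- TEXT_TYPE_TEXT = 0
-- TEXT_TYPE_CRLF = 1
-- TEXT_TYPE_VAR_LEFT = 2
-- TEXT_TYPE_VAR_BLOCK = 3
-- TEXT_TYPE_VAR_RIGHT = 4
-- TEXT_TYPE_LOGIC_LEFT = 5
-- TEXT_TYPE_LOGIC_BLOCK = 6
-- TEXT_TYPE_LOGIC_RIGHT = 7
--
-- # (left marker, right marker) -> block type; any other adjacency is plain text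
-- _BLOCK_TYPE = {
--     (TEXT_TYPE_VAR_LEFT, TEXT_TYPE_VAR_RIGHT): TEXT_TYPE_VAR_BLOCK,
--     (TEXT_TYPE_LOGIC_LEFT, TEXT_TYPE_LOGIC_RIGHT): TEXT_TYPE_LOGIC_BLOCK,
-- }
--
--
-- def __split_string_from_pos_info(s: str, pos_results: list):
--     """Columnar, staged decomposition: instead of one loop threading running
--     state, build the four columns of the answer as whole lists (marker types,
--     the segment end of each marker, the position just after each marker), then
--     zip them together -- the begin column and previous-type column are simply
--     the after/type columns shifted right by one (zip truncates the extras).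
--     Classification is a table lookup instead of a branch chain."""
--     types = [t for _, t, _ in pos_results]
--     ends = [p + 1 if t == TEXT_TYPE_CRLF else p for _, t, p in pos_results]
--     afters = [p + 1 if t == TEXT_TYPE_CRLF else p + 2 for _, t, p in pos_results]
--     return [
--         (line_no, _BLOCK_TYPE.get((prev_t, t), TEXT_TYPE_TEXT), s[b:e])
--         for (line_no, _, _), prev_t, t, b, e in zip(
--             pos_results, [TEXT_TYPE_TEXT] + types, types, [0] + afters, ends)
--     ]
-- ===== Notes on version B (the rewrite author's own statement) =====
-- stated objective: alternative
-- what changed: Replaces A's single stateful loop threading (pos, last_text_type) by staged columnar passes: the type/end/after columns are built as whole lists first, then zipped against their right-shifted copies, with classification done by a (prev,cur)->block lookup table instead of a branch chain.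
import Mathlib
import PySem

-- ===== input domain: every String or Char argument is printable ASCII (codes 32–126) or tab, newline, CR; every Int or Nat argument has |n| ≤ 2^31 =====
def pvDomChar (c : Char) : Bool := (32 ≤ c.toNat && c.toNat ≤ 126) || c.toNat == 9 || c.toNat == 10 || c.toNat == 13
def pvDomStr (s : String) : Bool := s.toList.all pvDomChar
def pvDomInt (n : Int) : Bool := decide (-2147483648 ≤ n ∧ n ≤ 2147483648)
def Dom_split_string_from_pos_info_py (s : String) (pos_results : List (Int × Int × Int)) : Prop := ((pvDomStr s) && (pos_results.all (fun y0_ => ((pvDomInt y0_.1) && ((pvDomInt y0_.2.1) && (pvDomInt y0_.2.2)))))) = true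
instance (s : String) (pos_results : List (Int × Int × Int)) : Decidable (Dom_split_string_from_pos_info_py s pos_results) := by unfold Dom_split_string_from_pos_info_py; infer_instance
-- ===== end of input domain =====

-- B replaces A's single stateful loop (carrying pos and last_text_type) by staged columnar
-- passes: whole columns (types, ends, afters) built first, then zipped with their shifted
-- copies; classification becomes a table lookup. Objective: alternative decomposition.

-- ===== PORT A =====
-- literal transliteration of A: one fold carrying (results, pos, last_text_type)
def split_string_from_pos_info_py (s : String) (pos_results : List (Int × Int × Int)) : List (Int × Int × String) :=
  (pos_results.foldl (fun (st : List (Int × Int × String) × Int × Int) el =>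
      let results := st.1
      let pos := st.2.1
      let last_text_type := st.2.2
      let line_no := el.1
      let text_type := el.2.1
      let start_pos := el.2.2
      let b := pos
      let pe : Int × Int :=
        if text_type == 1 then (start_pos + 1, start_pos + 1) else (start_pos + 2, start_pos)
      let pos' := pe.1
      let e := pe.2
      let t : Int :=
        if last_text_type == 2 && text_type == 4 then 3
        else if last_text_type == 5 && text_type == 7 then 6
        else 0
      (results ++ [(line_no, t, PySem.Str.slice s (some b) (some e))], pos', text_type))
    ([], 0, 0)).1

-- ===== PORT B =====
-- Source B's _BLOCK_TYPE table
def pvBlockType : PySem.Dict (Int × Int) Int :=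
  (PySem.Dict.empty.insert (2, 4) 3).insert (5, 7) 6

def split_string_from_pos_info_py_alt (s : String) (pos_results : List (Int × Int × Int)) : List (Int × Int × String) :=
  let types := pos_results.map (fun el => el.2.1)
  let ends := pos_results.map (fun el => if el.2.1 == 1 then el.2.2 + 1 else el.2.2)
  let afters := pos_results.map (fun el => if el.2.1 == 1 then el.2.2 + 1 else el.2.2 + 2)
  (List.zip pos_results (List.zip ((0 : Int) :: types) (List.zip types (List.zip ((0 : Int) :: afters) ends)))).map
    (fun q =>
      (q.1.1, pvBlockType.getD (q.2.1, q.2.2.1) 0,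
        PySem.Str.slice s (some q.2.2.2.1) (some q.2.2.2.2)))

-- ===== PRECONDITION & SPEC =====
def Spec_split_string_from_pos_info_py (s : String) (pos_results : List (Int × Int × Int)) (out : List (Int × Int × String)) : Prop := out = split_string_from_pos_info_py_alt s pos_results
instance (s : String) (pos_results : List (Int × Int × Int)) (out : List (Int × Int × String)) : Decidable (Spec_split_string_from_pos_info_py s pos_results out) := by unfold Spec_split_string_from_pos_info_py; infer_instance

-- ===== CLAIM (what is proved, stated in full; the proofs are below) =====
def Claim_equal_split_string_from_pos_info_py : Prop := ∀ (s : String) (pos_results : List (Int × Int × Int)), Dom_split_string_from_pos_info_py s pos_results → Spec_split_string_from_pos_info_py s pos_results (split_string_from_pos_info_py s pos_results)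

-- ===== LEMMAS AND PROOFS =====

-- the table lookup agrees with A's branch chain
theorem pvBlockType_getD (pt tt : Int) :
    pvBlockType.getD (pt, tt) 0 =
      (if pt == 2 && tt == 4 then 3 else if pt == 5 && tt == 7 then 6 else 0) := by
  by_cases h1 : (pt, tt) = ((2 : Int), (4 : Int))
  · obtain ⟨rfl, rfl⟩ := Prod.mk.injEq .. ▸ h1; decide
  · by_cases h2 : (pt, tt) = ((5 : Int), (7 : Int))
    · obtain ⟨rfl, rfl⟩ := Prod.mk.injEq .. ▸ h2; decide
    · rw [pvBlockType, PySem.Dict.getD_insert, if_neg h2, PySem.Dict.getD_insert, if_neg h1,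
        PySem.Dict.getD_empty]
      have e1 : (pt == 2 && tt == 4) = false := by
        by_contra h; simp only [Bool.not_eq_false, Bool.and_eq_true, beq_iff_eq] at h
        exact h1 (by simp [h.1, h.2])
      have e2 : (pt == 5 && tt == 7) = false := by
        by_contra h; simp only [Bool.not_eq_false, Bool.and_eq_true, beq_iff_eq] at h
        exact h2 (by simp [h.1, h.2])
      rw [e1, e2]; rfl

-- loop invariant: A's fold from state (acc, after(prev), type(prev)) produces
-- acc ++ (B's zipped columns with the shifted columns headed by after(prev)/type(prev))
theorem pvLoop_eq (s : String) (l : List (Int × Int × Int))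
    (acc : List (Int × Int × String)) (p0 t0 : Int) :
    (l.foldl (fun (st : List (Int × Int × String) × Int × Int) el =>
      let results := st.1
      let pos := st.2.1
      let last_text_type := st.2.2
      let line_no := el.1
      let text_type := el.2.1
      let start_pos := el.2.2
      let b := pos
      let pe : Int × Int :=
        if text_type == 1 then (start_pos + 1, start_pos + 1) else (start_pos + 2, start_pos)
      let pos' := pe.1
      let e := pe.2
      let t : Int :=
        if last_text_type == 2 && text_type == 4 then 3
        else if last_text_type == 5 && text_type == 7 then 6
        else 0
      (results ++ [(line_no, t, PySem.Str.slice s (some b) (some e))], pos', text_type))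
      (acc, p0, t0)).1
    = acc ++ (List.zip l (List.zip (t0 :: l.map (fun el => el.2.1))
        (List.zip (l.map (fun el => el.2.1))
          (List.zip (p0 :: l.map (fun el => if el.2.1 == 1 then el.2.2 + 1 else el.2.2 + 2))
            (l.map (fun el => if el.2.1 == 1 then el.2.2 + 1 else el.2.2)))))).map
        (fun q =>
          (q.1.1, pvBlockType.getD (q.2.1, q.2.2.1) 0,
            PySem.Str.slice s (some q.2.2.2.1) (some q.2.2.2.2))) := by
  induction l generalizing acc p0 t0 with
  | nil => simp
  | cons hd tl ih =>
    obtain ⟨ln, tt, sp⟩ := hd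
    have IH := ih (acc ++ [(ln,
        (if t0 == 2 && tt == 4 then 3 else if t0 == 5 && tt == 7 then 6 else 0),
        PySem.Str.slice s (some p0) (some (if tt == 1 then sp + 1 else sp)))])
      (if tt == 1 then sp + 1 else sp + 2) tt
    by_cases h : tt == 1 <;>
      simp only [List.foldl_cons, List.map_cons, List.zip_cons_cons, List.map, h,
        if_true, if_false, Bool.false_eq_true] at IH ⊢ <;>
      rw [IH] <;>
      simp [List.append_assoc, pvBlockType_getD]

-- ===== VERDICT (by name: the statement is the Claim_ definition above) =====
theorem split_string_from_pos_info_py_spec : Claim_equal_split_string_from_pos_info_py := by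
  intro s pos_results _
  unfold Spec_split_string_from_pos_info_py split_string_from_pos_info_py split_string_from_pos_info_py_alt
  exact pvLoop_eq s pos_results [] 0 0
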